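-- pv_equiv track=rewrite | github.com/danil31219as/tic-tac-toe-tinkoff | tic-tac-toe-test.py | main_diagonal_check
-- ===== SOURCE A (Python) =====
-- def main_diagonal_check(field, n, k,
--                         simbol):  # проверка победы по главным диагоналям
--     max_count = 0
--     for i in range(-n + 1, n):
--         if i < 0:
--             count = 0
--             for j in range(n + i):
--                 if field[abs(i) + j][0 + j] == simbol:
--                     count += 1
--                 else:
--                     if count > max_count:
--                         max_count = count
--                     count = 0
--             if count > max_count:
--                 max_count = count
--         else:
--             count = 0
--             for j in range(n - i):
--                 if field[0 + j][i + j] == simbol: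
--                     count += 1
--                 else:
--                     if count > max_count:
--                         max_count = count
--                     count = 0
--             if count > max_count:
--                 max_count = count
--
--     return max_count
-- ===== SOURCE B (Python) =====
-- def main_diagonal_check(field, n, k, simbol):
--     # Row-major DP: cur[j] = length of the diagonal run ending at (i, j).
--     max_count = 0
--     prev = [0] * n
--     for i in range(n):
--         row = field[i]
--         cur = []
--         for j in range(n):
--             if row[j] == simbol:
--                 v = prev[j - 1] + 1 if j > 0 else 1
--             else:
--                 v = 0
--             cur.append(v)
--             if v > max_count:
--                 max_count = v
--         prev = cur
--     return max_count
-- ===== Notes on version B (the rewrite author's own statement) =====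
-- stated objective: alternative
-- what changed: Replaces A's per-diagonal scans (one inner loop per diagonal with a run counter) by a single row-major dynamic-programming pass keeping a rolling array of run lengths ending at each cell of the current row.
import Mathlib
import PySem

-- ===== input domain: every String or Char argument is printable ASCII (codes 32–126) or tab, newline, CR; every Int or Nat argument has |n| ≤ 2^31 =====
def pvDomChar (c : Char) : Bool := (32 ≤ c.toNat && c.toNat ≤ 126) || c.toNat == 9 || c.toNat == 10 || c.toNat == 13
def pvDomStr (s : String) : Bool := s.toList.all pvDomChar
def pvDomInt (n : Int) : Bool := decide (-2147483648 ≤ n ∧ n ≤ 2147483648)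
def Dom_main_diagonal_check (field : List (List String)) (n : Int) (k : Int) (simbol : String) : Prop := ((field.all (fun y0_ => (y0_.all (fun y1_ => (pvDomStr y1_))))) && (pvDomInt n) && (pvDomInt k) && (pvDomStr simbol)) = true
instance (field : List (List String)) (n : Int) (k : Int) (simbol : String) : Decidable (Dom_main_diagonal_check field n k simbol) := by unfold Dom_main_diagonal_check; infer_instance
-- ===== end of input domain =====

-- B replaces A's per-diagonal scans by a single row-major dynamic-programming pass
-- (rolling array of run lengths ending at each cell); objective: alternative decomposition.


-- ===== PORT A =====
def main_diagonal_check (field : List (List String)) (n : Int) (k : Int) (simbol : String) : Int :=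
  (PySem.List.pyRange (-n + 1) n 1).foldl (fun max_count i =>
    if i < 0 then
      let s := (PySem.List.pyRange 0 (n + i) 1).foldl (fun (s : Int × Int) j =>
        if PySem.List.pyGetD (PySem.List.pyGetD field (|i| + j) []) (0 + j) "" == simbol then
          (s.1 + 1, s.2)
        else
          (0, if s.1 > s.2 then s.1 else s.2)) (0, max_count)
      if s.1 > s.2 then s.1 else s.2
    else
      let s := (PySem.List.pyRange 0 (n - i) 1).foldl (fun (s : Int × Int) j =>
        if PySem.List.pyGetD (PySem.List.pyGetD field (0 + j) []) (i + j) "" == simbol then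
          (s.1 + 1, s.2)
        else
          (0, if s.1 > s.2 then s.1 else s.2)) (0, max_count)
      if s.1 > s.2 then s.1 else s.2) 0

-- ===== PORT B =====
def main_diagonal_check_alt (field : List (List String)) (n : Int) (k : Int) (simbol : String) : Int :=
  ((PySem.List.pyRange 0 n 1).foldl (fun (st : List Int × Int) i =>
    let row := PySem.List.pyGetD field i []
    (PySem.List.pyRange 0 n 1).foldl (fun (t : List Int × Int) j =>
      let v : Int :=
        if PySem.List.pyGetD row j "" == simbol then
          (if j > 0 then PySem.List.pyGetD st.1 (j - 1) 0 + 1 else 1)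
        else 0
      (t.1 ++ [v], if v > t.2 then v else t.2)) ([], st.2))
    (List.replicate n.toNat 0, 0)).2

-- ===== PRECONDITION & SPEC =====
-- Pre_ excludes exactly the inputs on which Python A raises IndexError: whenever n > 0 the
-- field must have at least n rows each of length at least n (A reads every cell of the n×n grid).
def Pre_main_diagonal_check (field : List (List String)) (n : Int) (k : Int) (simbol : String) : Prop :=
  0 < n → (n ≤ (field.length : Int) ∧ ∀ row ∈ field.take n.toNat, n ≤ (row.length : Int))
instance (field : List (List String)) (n : Int) (k : Int) (simbol : String) : Decidable (Pre_main_diagonal_check field n k simbol) := by unfold Pre_main_diagonal_check; infer_instance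

def pvWitness_main_diagonal_check : List (List String) × Int × Int × String :=
  ([["X", "O"], ["O", "X"]], 2, 3, "X")

def Spec_main_diagonal_check (field : List (List String)) (n : Int) (k : Int) (simbol : String) (out : Int) : Prop := out = main_diagonal_check_alt field n k simbol
instance (field : List (List String)) (n : Int) (k : Int) (simbol : String) (out : Int) : Decidable (Spec_main_diagonal_check field n k simbol out) := by unfold Spec_main_diagonal_check; infer_instance

-- ===== CLAIM (what is proved, stated in full; the proofs are below) =====
def Claim_equal_main_diagonal_check : Prop := ∀ (field : List (List String)) (n : Int) (k : Int) (simbol : String), Dom_main_diagonal_check field n k simbol → Pre_main_diagonal_check field n k simbol → Spec_main_diagonal_check field n k simbol (main_diagonal_check field n k simbol)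

-- ===== LEMMAS AND PROOFS =====

-- the (defaulted) cell of the grid at row r, column c
def pvCell (field : List (List String)) (r c : Nat) : String := (field.getD r []).getD c ""

-- length of the run of `simbol` cells ending at (r, c) along its main diagonal
def pvRun (field : List (List String)) (simbol : String) : Nat → Nat → Int
  | 0, c => if pvCell field 0 c == simbol then 1 else 0
  | r + 1, 0 => if pvCell field (r + 1) 0 == simbol then 1 else 0
  | r + 1, c + 1 => if pvCell field (r + 1) (c + 1) == simbol then pvRun field simbol r c + 1 else 0

theorem pvRun_start (field : List (List String)) (simbol : String) (r0 c0 : Nat)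
    (h : r0 = 0 ∨ c0 = 0) :
    pvRun field simbol r0 c0 = if pvCell field r0 c0 == simbol then 1 else 0 := by
  rcases h with h | h
  · subst h; rfl
  · subst h; cases r0 <;> rfl

theorem pvRun_succ (field : List (List String)) (simbol : String) (r c : Nat) :
    pvRun field simbol (r + 1) (c + 1)
      = if pvCell field (r + 1) (c + 1) == simbol then pvRun field simbol r c + 1 else 0 := rfl

theorem pvRun_eq (field : List (List String)) (simbol : String) (i j : Nat) :
    pvRun field simbol i j
      = if pvCell field i j == simbol then
          (if 0 < j then (if i = 0 then 0 else pvRun field simbol (i - 1) (j - 1)) + 1 else 1)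
        else 0 := by
  cases i <;> cases j <;> simp [pvRun]

-- max of pvRun over a list of cells, floored at 0
def pvMaxOver (field : List (List String)) (simbol : String) (cells : List (Nat × Nat)) : Int :=
  cells.foldl (fun a p => max a (pvRun field simbol p.1 p.2)) 0

-- the cells of the diagonal A scans at outer index i
def pvDiag (n : Int) (i : Int) : List (Nat × Nat) :=
  if i < 0 then (List.range (n + i).toNat).map (fun t => ((-i).toNat + t, t))
  else (List.range (n - i).toNat).map (fun t => (t, i.toNat + t))

-- the cells as A visits them: grouped by diagonal
def pvCellsA (n : Int) : List (Nat × Nat) :=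
  (PySem.List.pyRange (-n + 1) n 1).flatMap (pvDiag n)

-- the cells as B visits them: grouped by row
def pvCellsB (n : Int) : List (Nat × Nat) :=
  (List.range n.toNat).flatMap (fun r => (List.range n.toNat).map (fun c => (r, c)))

theorem pvMaxOver_nonneg (field : List (List String)) (simbol : String) (cells : List (Nat × Nat)) :
    0 ≤ pvMaxOver field simbol cells :=
  (PySem.List.le_foldl_max_int cells (fun p => pvRun field simbol p.1 p.2) 0).1

theorem pvFoldlMax_nonneg {α : Type} (l : List α) (g : α → Int) :
    0 ≤ l.foldl (fun acc x => max acc (g x)) 0 :=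
  (PySem.List.le_foldl_max_int l g 0).1

theorem pvFoldlMax_shift {α : Type} (l : List α) (g : α → Int) (a : Int) (ha : 0 ≤ a) :
    l.foldl (fun acc x => max acc (g x)) a = max a (l.foldl (fun acc x => max acc (g x)) 0) := by
  induction l generalizing a with
  | nil => simp only [List.foldl_nil]; omega
  | cons x l ih =>
    simp only [List.foldl_cons]
    rw [ih (max a (g x)) (by omega), ih (max 0 (g x)) (by omega)]
    have h0 := pvFoldlMax_nonneg l g
    omega

theorem pvFoldlCongrInv {α σ : Type} (l : List α) (f g : σ → α → σ) (I : σ → Prop) (a : σ)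
    (hI : I a) (hpres : ∀ s x, I s → x ∈ l → I (f s x) ∧ f s x = g s x) :
    l.foldl f a = l.foldl g a := by
  induction l generalizing a with
  | nil => rfl
  | cons x l ih =>
    obtain ⟨h1, h2⟩ := hpres a x hI (List.mem_cons_self)
    simp only [List.foldl_cons]
    rw [← h2, ih (f a x) h1 (fun s y hs hy => hpres s y hs (List.mem_cons_of_mem _ hy))]

theorem pvMaxOver_flatMap {ι : Type} (field : List (List String)) (simbol : String)
    (l : List ι) (cf : ι → List (Nat × Nat)) :
    l.foldl (fun mc i => max mc (pvMaxOver field simbol (cf i))) 0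
      = pvMaxOver field simbol (l.flatMap cf) := by
  induction l with
  | nil => simp [pvMaxOver]
  | cons i l ih =>
    have key : pvMaxOver field simbol (cf i ++ l.flatMap cf)
        = max (pvMaxOver field simbol (cf i)) (pvMaxOver field simbol (l.flatMap cf)) := by
      show List.foldl _ 0 (cf i ++ l.flatMap cf) = _
      rw [List.foldl_append]
      exact pvFoldlMax_shift _ _ _ (pvMaxOver_nonneg field simbol (cf i))
    simp only [List.foldl_cons, List.flatMap_cons]
    rw [pvFoldlMax_shift _ _ _ (by have := pvMaxOver_nonneg field simbol (cf i); omega), ih, key]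
    have h1 := pvMaxOver_nonneg field simbol (cf i)
    have h2 := pvMaxOver_nonneg field simbol (l.flatMap cf)
    omega

theorem pvMaxOver_le (field : List (List String)) (simbol : String) (cells : List (Nat × Nat))
    (X : Int) (h0 : 0 ≤ X) (h : ∀ p ∈ cells, pvRun field simbol p.1 p.2 ≤ X) :
    pvMaxOver field simbol cells ≤ X := by
  induction cells with
  | nil => simpa [pvMaxOver] using h0
  | cons p l ih =>
    unfold pvMaxOver at *
    simp only [List.foldl_cons]
    rw [pvFoldlMax_shift _ _ _ (by have := h p (by simp); omega)]
    have h1 := ih (fun q hq => h q (List.mem_cons_of_mem _ hq))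
    have h2 := h p (by simp)
    omega

theorem pvLe_maxOver (field : List (List String)) (simbol : String) (cells : List (Nat × Nat))
    (p : Nat × Nat) (hp : p ∈ cells) :
    pvRun field simbol p.1 p.2 ≤ pvMaxOver field simbol cells := by
  induction cells with
  | nil => cases hp
  | cons q l ih =>
    unfold pvMaxOver at *
    simp only [List.foldl_cons]
    rw [pvFoldlMax_shift _ _ _ (by omega)]
    rcases List.mem_cons.mp hp with h | h
    · subst h; have := pvFoldlMax_nonneg l (fun p => pvRun field simbol p.1 p.2); omega
    · have := ih h; omega

theorem pvMaxOver_eq_of_mem_iff (field : List (List String)) (simbol : String)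
    (c1 c2 : List (Nat × Nat)) (h : ∀ p, p ∈ c1 ↔ p ∈ c2) :
    pvMaxOver field simbol c1 = pvMaxOver field simbol c2 := by
  refine le_antisymm ?_ ?_
  · exact pvMaxOver_le _ _ _ _ (pvMaxOver_nonneg field simbol c2)
      (fun p hp => pvLe_maxOver _ _ _ _ ((h p).mp hp))
  · exact pvMaxOver_le _ _ _ _ (pvMaxOver_nonneg field simbol c1)
      (fun p hp => pvLe_maxOver _ _ _ _ ((h p).mpr hp))

theorem pvMem_cellsA (n : Int) (p : Nat × Nat) :
    p ∈ pvCellsA n ↔ (p.1 : Int) < n ∧ (p.2 : Int) < n := by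
  unfold pvCellsA pvDiag
  simp only [List.mem_flatMap, PySem.List.mem_pyRange_one]
  constructor
  · rintro ⟨i, ⟨hi1, hi2⟩, hp⟩
    split_ifs at hp with hneg
    · simp only [List.mem_map, List.mem_range] at hp
      obtain ⟨t, ht, rfl⟩ := hp
      simp only
      omega
    · simp only [List.mem_map, List.mem_range] at hp
      obtain ⟨t, ht, rfl⟩ := hp
      simp only
      omega
  · rintro ⟨h1, h2⟩
    obtain ⟨r, c⟩ := p
    refine ⟨(c : Int) - (r : Int), by omega, ?_⟩
    split_ifs with hneg
    · simp only [List.mem_map, List.mem_range, Prod.mk.injEq]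
      exact ⟨c, by omega, by omega, by omega⟩
    · simp only [List.mem_map, List.mem_range, Prod.mk.injEq]
      exact ⟨r, by omega, by omega, by omega⟩

theorem pvMem_cellsB (n : Int) (p : Nat × Nat) :
    p ∈ pvCellsB n ↔ (p.1 : Int) < n ∧ (p.2 : Int) < n := by
  unfold pvCellsB
  simp only [List.mem_flatMap, List.mem_map, List.mem_range]
  constructor
  · rintro ⟨r, hr, c, hc, rfl⟩; simp only; omega
  · rintro ⟨h1, h2⟩; exact ⟨p.1, by omega, p.2, by omega, rfl⟩

-- invariant of A's inner loop: count = run ending at the last scanned cell,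
-- and max(max_count, count) = max over the scanned prefix
theorem pvInnerA_inv (b : Nat → Bool) (rl : Nat → Int)
    (hrl0 : rl 0 = if b 0 then 1 else 0)
    (hrlS : ∀ t, rl (t + 1) = if b (t + 1) then rl t + 1 else 0)
    (L : Nat) (mc : Int) (hmc : 0 ≤ mc) :
    let s := (List.range L).foldl (fun (s : Int × Int) t =>
      if b t then (s.1 + 1, s.2) else (0, if s.1 > s.2 then s.1 else s.2)) (0, mc)
    s.1 = (if L = 0 then 0 else rl (L - 1)) ∧ 0 ≤ s.1 ∧ mc ≤ s.2 ∧
      max s.2 s.1 = max mc ((List.range L).foldl (fun a t => max a (rl t)) 0) := by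
  induction L with
  | zero => simp
  | succ L ih =>
    obtain ⟨h1, h2, h3, h4⟩ := ih
    have hK := pvFoldlMax_nonneg (List.range L) rl
    rw [List.range_succ]
    simp only [List.foldl_append, List.foldl_cons, List.foldl_nil]
    have hrlL : rl L = if b L then
        (if L = 0 then 0 else rl (L - 1)) + 1 else 0 := by
      cases L with
      | zero => simpa using hrl0
      | succ t => rw [hrlS t]; simp
    cases hb : b L
    · rw [hb] at hrlL; simp only [Bool.false_eq_true, if_false] at hrlL
      simp only [Bool.false_eq_true, if_false]
      refine ⟨by simp [hrlL], by omega, by split_ifs <;> omega, ?_⟩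
      simp only [hrlL]
      split_ifs <;> omega
    · rw [hb] at hrlL; simp only [if_true] at hrlL
      simp only [if_true]
      refine ⟨by simp [hrlL, h1], by omega, h3, ?_⟩
      simp only [hrlL, ← h1]
      omega

theorem pvInnerA (b : Nat → Bool) (rl : Nat → Int)
    (hrl0 : rl 0 = if b 0 then 1 else 0)
    (hrlS : ∀ t, rl (t + 1) = if b (t + 1) then rl t + 1 else 0)
    (L : Nat) (mc : Int) (hmc : 0 ≤ mc) :
    (fun s : Int × Int => if s.1 > s.2 then s.1 else s.2)
        ((List.range L).foldl (fun (s : Int × Int) t =>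
          if b t then (s.1 + 1, s.2) else (0, if s.1 > s.2 then s.1 else s.2)) (0, mc))
      = max mc ((List.range L).foldl (fun a t => max a (rl t)) 0) := by
  obtain ⟨h1, h2, h3, h4⟩ := pvInnerA_inv b rl hrl0 hrlS L mc hmc
  simp only at *
  split_ifs <;> omega

theorem pvA_body (field : List (List String)) (n : Int) (simbol : String) (mc i : Int)
    (hmc : 0 ≤ mc) :
    (if i < 0 then
      (fun s : Int × Int => if s.1 > s.2 then s.1 else s.2)
        ((PySem.List.pyRange 0 (n + i) 1).foldl (fun (s : Int × Int) j =>
          if PySem.List.pyGetD (PySem.List.pyGetD field (|i| + j) []) (0 + j) "" == simbol then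
            (s.1 + 1, s.2)
          else (0, if s.1 > s.2 then s.1 else s.2)) (0, mc))
     else
      (fun s : Int × Int => if s.1 > s.2 then s.1 else s.2)
        ((PySem.List.pyRange 0 (n - i) 1).foldl (fun (s : Int × Int) j =>
          if PySem.List.pyGetD (PySem.List.pyGetD field (0 + j) []) (i + j) "" == simbol then
            (s.1 + 1, s.2)
          else (0, if s.1 > s.2 then s.1 else s.2)) (0, mc)))
    = max mc (pvMaxOver field simbol (pvDiag n i)) := by
  unfold pvDiag
  split_ifs with hneg
  · rw [PySem.List.pyRange_one]
    simp only [sub_zero]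
    rw [List.foldl_map]
    have hfun : (fun (s : Int × Int) (t : Nat) =>
        if PySem.List.pyGetD (PySem.List.pyGetD field (|i| + (0 + (t : Int))) [])
            (0 + (0 + (t : Int))) "" == simbol then (s.1 + 1, s.2)
        else (0, if s.1 > s.2 then s.1 else s.2))
        = (fun (s : Int × Int) (t : Nat) =>
          if pvCell field ((-i).toNat + t) t == simbol then (s.1 + 1, s.2)
          else (0, if s.1 > s.2 then s.1 else s.2)) := by
      funext s t
      have e1 : |i| + (0 + (t : Int)) = (((-i).toNat + t : Nat) : Int) := by
        rw [abs_of_neg hneg]; omega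
      have e2 : (0 + (0 + (t : Int))) = ((t : Nat) : Int) := by omega
      rw [e1, e2, PySem.List.pyGetD_natCast, PySem.List.pyGetD_natCast]
      rfl
    rw [hfun]
    have hres := pvInnerA (fun t => pvCell field ((-i).toNat + t) t == simbol)
      (fun t => pvRun field simbol ((-i).toNat + t) t)
      (pvRun_start field simbol ((-i).toNat + 0) 0 (Or.inr rfl))
      (fun t => pvRun_succ field simbol ((-i).toNat + t) t)
      (n + i).toNat mc hmc
    beta_reduce at hres
    rw [hres]
    show _ = max mc (List.foldl _ 0 (List.map _ _))
    rw [List.foldl_map]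
  · rw [PySem.List.pyRange_one]
    simp only [sub_zero]
    rw [List.foldl_map]
    have hfun : (fun (s : Int × Int) (t : Nat) =>
        if PySem.List.pyGetD (PySem.List.pyGetD field (0 + (0 + (t : Int))) [])
            (i + (0 + (t : Int))) "" == simbol then (s.1 + 1, s.2)
        else (0, if s.1 > s.2 then s.1 else s.2))
        = (fun (s : Int × Int) (t : Nat) =>
          if pvCell field t (i.toNat + t) == simbol then (s.1 + 1, s.2)
          else (0, if s.1 > s.2 then s.1 else s.2)) := by
      funext s t
      have e1 : (0 + (0 + (t : Int))) = ((t : Nat) : Int) := by omega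
      have e2 : i + (0 + (t : Int)) = ((i.toNat + t : Nat) : Int) := by omega
      rw [e1, e2, PySem.List.pyGetD_natCast, PySem.List.pyGetD_natCast]
      rfl
    rw [hfun]
    have hres := pvInnerA (fun t => pvCell field t (i.toNat + t) == simbol)
      (fun t => pvRun field simbol t (i.toNat + t))
      (pvRun_start field simbol 0 (i.toNat + 0) (Or.inl rfl))
      (fun t => pvRun_succ field simbol t (i.toNat + t))
      (n - i).toNat mc hmc
    beta_reduce at hres
    rw [hres]
    show _ = max mc (List.foldl _ 0 (List.map _ _))
    rw [List.foldl_map]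

theorem pvA_eq (field : List (List String)) (n k : Int) (simbol : String) :
    main_diagonal_check field n k simbol = pvMaxOver field simbol (pvCellsA n) := by
  unfold main_diagonal_check pvCellsA
  rw [← pvMaxOver_flatMap]
  refine pvFoldlCongrInv _ _ _ (fun mc : Int => 0 ≤ mc) _ le_rfl ?_
  intro mc i hmc _
  have heq := pvA_body field n simbol mc i hmc
  refine ⟨?_, heq⟩
  rw [show (if i < 0 then _ else _) = _ from heq]
  have := pvMaxOver_nonneg field simbol (pvDiag n i)
  omega

-- value written by B's inner loop at column j, reading the previous row's runs from prev
def pvV (field : List (List String)) (simbol : String) (prev : List Int) (i j : Nat) : Int :=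
  if pvCell field i j == simbol then (if 0 < j then prev.getD (j - 1) 0 + 1 else 1) else 0

theorem pvV_eq (field : List (List String)) (simbol : String) (i j m : Nat) (prev : List Int)
    (hj : j < m)
    (hprev : ∀ t, t < m → prev.getD t 0 = if i = 0 then 0 else pvRun field simbol (i - 1) t) :
    pvV field simbol prev i j = pvRun field simbol i j := by
  rw [pvRun_eq]
  unfold pvV
  by_cases hj0 : 0 < j
  · rw [hprev (j - 1) (by omega)]
  · simp [hj0]

theorem pvPairFold (l : List Nat) (w : Nat → Int) (cur : List Int) (mc : Int) :
    l.foldl (fun (t : List Int × Int) j => (t.1 ++ [w j], if w j > t.2 then w j else t.2)) (cur, mc)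
      = (cur ++ l.map w, l.foldl (fun a j => max a (w j)) mc) := by
  induction l generalizing cur mc with
  | nil => simp
  | cons j l ih =>
    simp only [List.foldl_cons, List.map_cons]
    rw [ih]
    have h : (if w j > mc then w j else mc) = max mc (w j) := by split_ifs <;> omega
    rw [h]
    simp

-- B's outer fold with the PySem indexing already removed
theorem pvB_port_eq (field : List (List String)) (n k : Int) (simbol : String) :
    main_diagonal_check_alt field n k simbol
      = ((List.range n.toNat).foldl (fun (st : List Int × Int) i =>
          ((List.range n.toNat).map (pvV field simbol st.1 i),
           (List.range n.toNat).foldl (fun a j => max a (pvV field simbol st.1 i j)) st.2))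
          (List.replicate n.toNat 0, 0)).2 := by
  unfold main_diagonal_check_alt
  dsimp only
  rw [PySem.List.pyRange_one]
  simp only [sub_zero]
  rw [List.foldl_map]
  have hfun : (fun (st : List Int × Int) (i : Nat) =>
      ((List.range n.toNat).map (fun k : Nat => (0 : Int) + (k : Int))).foldl
        (fun (t : List Int × Int) j =>
        (t.1 ++ [if PySem.List.pyGetD (PySem.List.pyGetD field (0 + (i : Int)) []) j ""
              == simbol then
            (if j > 0 then PySem.List.pyGetD st.1 (j - 1) 0 + 1 else 1) else 0],
         if (if PySem.List.pyGetD (PySem.List.pyGetD field (0 + (i : Int)) []) j ""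
              == simbol then
            (if j > 0 then PySem.List.pyGetD st.1 (j - 1) 0 + 1 else 1) else 0) > t.2 then
           (if PySem.List.pyGetD (PySem.List.pyGetD field (0 + (i : Int)) []) j ""
              == simbol then
            (if j > 0 then PySem.List.pyGetD st.1 (j - 1) 0 + 1 else 1) else 0)
         else t.2)) ([], st.2))
      = (fun (st : List Int × Int) (i : Nat) =>
        ((List.range n.toNat).map (pvV field simbol st.1 i),
         (List.range n.toNat).foldl (fun a j => max a (pvV field simbol st.1 i j)) st.2)) := by
    funext st i
    rw [List.foldl_map]
    have hbody : (fun (t : List Int × Int) (j : Nat) =>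
        (t.1 ++ [if PySem.List.pyGetD (PySem.List.pyGetD field (0 + (i : Int)) [])
              (0 + (j : Int)) "" == simbol then
            (if 0 + (j : Int) > 0 then PySem.List.pyGetD st.1 (0 + (j : Int) - 1) 0 + 1 else 1)
          else 0],
         if (if PySem.List.pyGetD (PySem.List.pyGetD field (0 + (i : Int)) [])
              (0 + (j : Int)) "" == simbol then
            (if 0 + (j : Int) > 0 then PySem.List.pyGetD st.1 (0 + (j : Int) - 1) 0 + 1 else 1)
          else 0) > t.2 then
           (if PySem.List.pyGetD (PySem.List.pyGetD field (0 + (i : Int)) [])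
              (0 + (j : Int)) "" == simbol then
            (if 0 + (j : Int) > 0 then PySem.List.pyGetD st.1 (0 + (j : Int) - 1) 0 + 1 else 1)
          else 0)
         else t.2))
        = (fun (t : List Int × Int) (j : Nat) =>
          (t.1 ++ [pvV field simbol st.1 i j],
           if pvV field simbol st.1 i j > t.2 then pvV field simbol st.1 i j else t.2)) := by
      funext t j
      have hv : (if PySem.List.pyGetD (PySem.List.pyGetD field (0 + (i : Int)) [])
              (0 + (j : Int)) "" == simbol then
            (if 0 + (j : Int) > 0 then PySem.List.pyGetD st.1 (0 + (j : Int) - 1) 0 + 1 else 1)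
          else 0) = pvV field simbol st.1 i j := by
        by_cases hj : 0 < j
        · have hcast : (j : Int) - 1 = ((j - 1 : Nat) : Int) := by omega
          simp only [zero_add, PySem.List.pyGetD_natCast, gt_iff_lt, Nat.cast_pos, hcast]
          unfold pvV pvCell
          simp [hj]
        · simp only [zero_add, PySem.List.pyGetD_natCast, gt_iff_lt, Nat.cast_pos]
          unfold pvV pvCell
          simp [hj]
      rw [hv]
    rw [hbody, pvPairFold]
    simp
  rw [hfun]

-- loop invariant of B's outer loop: prev holds the previous row's run lengths and
-- max_count the running maximum over all processed rows
theorem pvB_inv (field : List (List String)) (simbol : String) (m : Nat) (i : Nat) :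
    (∀ t, t < m →
      (((List.range i).foldl (fun (st : List Int × Int) r =>
          ((List.range m).map (pvV field simbol st.1 r),
           (List.range m).foldl (fun a j => max a (pvV field simbol st.1 r j)) st.2))
        (List.replicate m 0, 0)).1.getD t 0
        = if i = 0 then 0 else pvRun field simbol (i - 1) t))
    ∧ ((List.range i).foldl (fun (st : List Int × Int) r =>
          ((List.range m).map (pvV field simbol st.1 r),
           (List.range m).foldl (fun a j => max a (pvV field simbol st.1 r j)) st.2))
        (List.replicate m 0, 0)).2
      = (List.range i).foldl (fun a r =>
          (List.range m).foldl (fun a t => max a (pvRun field simbol r t)) a) 0 := by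
  induction i with
  | zero => simp
  | succ i ih =>
    obtain ⟨ih1, ih2⟩ := ih
    rw [List.range_succ]
    simp only [List.foldl_append, List.foldl_cons, List.foldl_nil]
    refine ⟨?_, ?_⟩
    · intro t ht
      rw [PySem.List.getD_map_range, pvV_eq field simbol i t m _ ht ih1]
      · simp
      · exact ht
    · rw [← ih2]
      exact pvFoldlCongrInv _ _ _ (fun _ => True) _ trivial
        (fun a j _ hj =>
          ⟨trivial, by rw [pvV_eq field simbol i j m _ (List.mem_range.mp hj) ih1]⟩)

theorem pvB_eq (field : List (List String)) (n k : Int) (simbol : String) :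
    main_diagonal_check_alt field n k simbol = pvMaxOver field simbol (pvCellsB n) := by
  rw [pvB_port_eq field n k simbol, (pvB_inv field simbol n.toNat n.toNat).2]
  unfold pvCellsB
  rw [← pvMaxOver_flatMap]
  refine pvFoldlCongrInv _ _ _ (fun a : Int => 0 ≤ a) _ le_rfl ?_
  intro a r ha _
  have hrow : pvMaxOver field simbol ((List.range n.toNat).map (fun c => (r, c)))
      = (List.range n.toNat).foldl (fun a t => max a (pvRun field simbol r t)) 0 := by
    unfold pvMaxOver
    rw [List.foldl_map]
  constructor
  · have := pvFoldlMax_nonneg (List.range n.toNat) (pvRun field simbol r)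
    rw [pvFoldlMax_shift _ _ _ ha]
    omega
  · rw [pvFoldlMax_shift _ _ _ ha, hrow]

-- ===== VERDICT (by name: the statement is the Claim_ definition above) =====
theorem main_diagonal_check_spec : Claim_equal_main_diagonal_check := by
  intro field n k simbol _ _
  unfold Spec_main_diagonal_check
  rw [pvA_eq, pvB_eq]
  exact pvMaxOver_eq_of_mem_iff _ _ _ _ (fun p => by rw [pvMem_cellsA, pvMem_cellsB])
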